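-- pv_equiv track=rewrite | github.com/lene-annette/parkingspaces | lib/statistic.py | count_indreby
-- ===== SOURCE A (Python) =====
-- def count_indreby(data_set):
--     count = 0
--     space_on_road = 0
--     road_with_most_spots = ''
--     for data in data_set:
--         if data[6] == 'Indre By':
--             count += data[2]
--             if data[2] > space_on_road:
--                 space_on_road = data[2]
--                 road_with_most_spots = data[1]
--     return f'\nThere are {count} parking spaces in Indre By & the road with the most parkingspots is {road_with_most_spots}'
-- ===== SOURCE B (Python) =====
-- def count_indreby(data_set):
--     indre = [d for d in data_set if d[6] == 'Indre By']
--     count = sum(d[2] for d in indre)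
--     positive = [d for d in indre if d[2] > 0]
--     road_with_most_spots = max(positive, key=lambda d: d[2])[1] if positive else ''
--     return f'\nThere are {count} parking spaces in Indre By & the road with the most parkingspots is {road_with_most_spots}'
-- ===== Notes on version B (the rewrite author's own statement) =====
-- stated objective: simpler
-- what changed: Replaces the single fused loop carrying three mutable variables with a filter of the 'Indre By' rows, a one-line sum for the count, and a max (over the strictly-positive rows, defaulting to '' when none) for the road name.
import Mathlib
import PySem

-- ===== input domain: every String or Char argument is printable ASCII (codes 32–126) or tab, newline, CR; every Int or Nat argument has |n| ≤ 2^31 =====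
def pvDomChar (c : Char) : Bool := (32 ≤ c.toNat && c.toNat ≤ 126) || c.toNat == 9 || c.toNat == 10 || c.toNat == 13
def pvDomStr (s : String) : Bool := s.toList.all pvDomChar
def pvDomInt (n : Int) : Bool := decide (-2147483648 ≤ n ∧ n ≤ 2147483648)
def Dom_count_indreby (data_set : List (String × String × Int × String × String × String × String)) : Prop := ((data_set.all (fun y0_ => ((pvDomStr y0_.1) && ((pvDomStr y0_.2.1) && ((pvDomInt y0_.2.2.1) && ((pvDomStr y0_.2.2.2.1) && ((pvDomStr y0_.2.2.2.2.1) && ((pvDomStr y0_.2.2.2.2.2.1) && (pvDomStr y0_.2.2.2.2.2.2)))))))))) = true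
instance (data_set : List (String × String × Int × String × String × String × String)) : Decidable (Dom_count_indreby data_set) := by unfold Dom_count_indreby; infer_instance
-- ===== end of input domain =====

-- B replaces A's fused three-variable loop by filter + sum + max-over-positive-rows; objective: simpler (same O(n) cost).


-- ===== PORT A =====
-- the loop body of A, on the state (count, space_on_road, road_with_most_spots)
def pvStepA (st : Int × Int × String) (d : String × String × Int × String × String × String × String) : Int × Int × String :=
  if d.2.2.2.2.2.2 == "Indre By" then
    let count := st.1 + d.2.2.1
    if d.2.2.1 > st.2.1 then (count, d.2.2.1, d.2.1) else (count, st.2.1, st.2.2)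
  else st

-- one fold over the whole list carrying (count, space_on_road, road_with_most_spots)
def count_indreby (data_set : List (String × String × Int × String × String × String × String)) : String :=
  let st := data_set.foldl pvStepA (0, 0, "")
  "\nThere are " ++ PySem.Int.toStr st.1 ++ " parking spaces in Indre By & the road with the most parkingspots is " ++ st.2.2

-- ===== PORT B =====
-- Python's max with key returns the FIRST element with maximal key; ported as a fold that
-- replaces the best element only on a strictly greater key (exact for Python's max).
def pvBest (h : String × String × Int × String × String × String × String)
    (t : List (String × String × Int × String × String × String × String)) :
    String × String × Int × String × String × String × String :=
  t.foldl (fun b d => if d.2.2.1 > b.2.2.1 then d else b) h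

def count_indreby_alt (data_set : List (String × String × Int × String × String × String × String)) : String :=
  let indre := data_set.filter (fun d => d.2.2.2.2.2.2 == "Indre By")
  let count := indre.foldl (fun acc d => acc + d.2.2.1) 0
  let positive := indre.filter (fun d => decide (d.2.2.1 > 0))
  let road_with_most_spots :=
    match positive with
    | [] => ""
    | h :: t => (pvBest h t).2.1
  "\nThere are " ++ PySem.Int.toStr count ++ " parking spaces in Indre By & the road with the most parkingspots is " ++ road_with_most_spots

-- ===== PRECONDITION & SPEC =====
def Spec_count_indreby (data_set : List (String × String × Int × String × String × String × String)) (out : String) : Prop := out = count_indreby_alt data_set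
instance (data_set : List (String × String × Int × String × String × String × String)) (out : String) : Decidable (Spec_count_indreby data_set out) := by unfold Spec_count_indreby; infer_instance

-- ===== CLAIM (what is proved, stated in full; the proofs are below) =====
def Claim_equal_count_indreby : Prop := ∀ (data_set : List (String × String × Int × String × String × String × String)), Dom_count_indreby data_set → Spec_count_indreby data_set (count_indreby data_set)

-- ===== LEMMAS AND PROOFS =====

-- abbreviation for the row type used by the proofs
abbrev pvRow := String × String × Int × String × String × String × String

-- the max-update on the (space_on_road, road) pair
def pvG (sr : Int × String) (d : pvRow) : Int × String :=
  if d.2.2.1 > sr.1 then (d.2.2.1, d.2.1) else sr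

theorem pvSum_shift (xs : List pvRow) : ∀ (a : Int),
    xs.foldl (fun acc d => acc + d.2.2.1) a = a + xs.foldl (fun acc d => acc + d.2.2.1) 0 := by
  induction xs with
  | nil => intro a; simp
  | cons x xt ihx => intro a; simp only [List.foldl_cons]; rw [ihx, ihx (0 + _)]; ring_nf

-- A's fold = (c + sum over Indre-By rows, pvG-fold over Indre-By rows)
theorem pvFoldA_split (ds : List pvRow) : ∀ (c s : Int) (r : String),
    ds.foldl pvStepA (c, s, r)
    = (c + (ds.filter (fun d => d.2.2.2.2.2.2 == "Indre By")).foldl (fun acc d => acc + d.2.2.1) 0,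
       (ds.filter (fun d => d.2.2.2.2.2.2 == "Indre By")).foldl pvG (s, r)) := by
  induction ds with
  | nil => intro c s r; simp
  | cons d t ih =>
    intro c s r
    by_cases hd : d.2.2.2.2.2.2 == "Indre By"
    · simp only [List.filter_cons, hd, if_true]
      by_cases hgt : d.2.2.1 > s
      · have hstep : pvStepA (c, s, r) d = (c + d.2.2.1, d.2.2.1, d.2.1) := by
          simp [pvStepA, hd, hgt]
        rw [List.foldl_cons, hstep, ih]
        simp only [Prod.mk.injEq, List.foldl_cons]
        refine ⟨?_, ?_⟩
        · rw [pvSum_shift _ (0 + d.2.2.1)]; ring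
        · congr 1; simp [pvG, hgt]
      · have hstep : pvStepA (c, s, r) d = (c + d.2.2.1, s, r) := by
          simp [pvStepA, hd, hgt]
        rw [List.foldl_cons, hstep, ih]
        simp only [Prod.mk.injEq, List.foldl_cons]
        refine ⟨?_, ?_⟩
        · rw [pvSum_shift _ (0 + d.2.2.1)]; ring
        · congr 1; simp [pvG, hgt]
    · have hd' : (d.2.2.2.2.2.2 == "Indre By") = false := by simpa using hd
      simp only [List.filter_cons, hd', Bool.false_eq_true, if_false]
      rw [List.foldl_cons,
        show pvStepA (c, s, r) d = (c, s, r) by simp [pvStepA, hd]]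
      exact ih c s r

-- pvG ignores rows with non-positive spots when the running maximum is ≥ 0
theorem pvG_drop_nonpos (xs : List pvRow) : ∀ (s : Int) (r : String), 0 ≤ s →
    xs.foldl pvG (s, r) = (xs.filter (fun d => decide (d.2.2.1 > 0))).foldl pvG (s, r) := by
  induction xs with
  | nil => intro s r _; rfl
  | cons d t ih =>
    intro s r hs
    by_cases hp : d.2.2.1 > 0
    · have hp' : decide (d.2.2.1 > 0) = true := by simpa using hp
      simp only [List.filter_cons, hp', if_true]
      rw [List.foldl_cons, List.foldl_cons]
      by_cases hgt : d.2.2.1 > s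
      · rw [show pvG (s, r) d = (d.2.2.1, d.2.1) by simp [pvG, hgt]]
        exact ih _ _ (le_of_lt hp)
      · rw [show pvG (s, r) d = (s, r) by simp [pvG, hgt]]
        exact ih _ _ hs
    · have hgt : ¬ d.2.2.1 > s := by omega
      have hp' : decide (d.2.2.1 > 0) = false := by simpa using hp
      simp only [List.filter_cons, hp', Bool.false_eq_true, if_false]
      rw [List.foldl_cons,
        show pvG (s, r) d = (s, r) by simp [pvG, hgt]]
      exact ih _ _ hs

-- the pvG fold computes the (key, name) of B's first-maximal-element fold
theorem pvG_eq_bestRow (t : List pvRow) : ∀ (h : pvRow),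
    t.foldl pvG (h.2.2.1, h.2.1) = ((pvBest h t).2.2.1, (pvBest h t).2.1) := by
  induction t with
  | nil => intro h; rfl
  | cons d t ih =>
    intro h
    by_cases hgt : d.2.2.1 > h.2.2.1
    · rw [List.foldl_cons, show pvG (h.2.2.1, h.2.1) d = (d.2.2.1, d.2.1) by simp [pvG, hgt],
        show pvBest h (d :: t) = pvBest d t by simp [pvBest, hgt]]
      exact ih d
    · rw [List.foldl_cons, show pvG (h.2.2.1, h.2.1) d = (h.2.2.1, h.2.1) by simp [pvG, hgt],
        show pvBest h (d :: t) = pvBest h t by simp [pvBest, hgt]]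
      exact ih h

-- ===== VERDICT (by name: the statement is the Claim_ definition above) =====
theorem count_indreby_spec : Claim_equal_count_indreby := by
  intro ds _
  show count_indreby ds = count_indreby_alt ds
  simp only [count_indreby, count_indreby_alt]
  rw [pvFoldA_split, pvG_drop_nonpos _ 0 "" le_rfl]
  rcases hpos : (ds.filter (fun d => d.2.2.2.2.2.2 == "Indre By")).filter (fun d => decide (d.2.2.1 > 0)) with _ | ⟨h, t⟩
  · rw [hpos]; simp
  · have hh : h.2.2.1 > 0 := by
      have := List.of_mem_filter (l := ds.filter (fun d => d.2.2.2.2.2.2 == "Indre By"))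
        (p := fun d => decide (d.2.2.1 > 0)) (a := h) (by rw [hpos]; exact List.mem_cons_self)
      simpa using this
    rw [hpos, List.foldl_cons, show pvG (0, "") h = (h.2.2.1, h.2.1) by simp [pvG, hh],
      pvG_eq_bestRow]
    simp
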